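-- pv_equiv track=rewrite | github.com/joerenner/coref-hoi | jsonlines_formatting/make_jsonlines.py | get_token_id2offset
-- ===== SOURCE A (Python) =====
-- def get_token_id2offset(subtoken_map):
--     token_id2offset = dict()
--     s = 0
--     e = 0
--     prev = subtoken_map[0]
--     for i, t in enumerate(subtoken_map):
--         if t!=prev:
--             token_id2offset[prev] = (s, e)
--             s = i
--             e = i
--         e = i
--         prev = t
--     if subtoken_map[-1]==prev:
--         token_id2offset[prev] = (s, e)
--     return token_id2offset
-- ===== SOURCE B (Python) =====
-- def get_token_id2offset(subtoken_map):
--     token_id2offset = {}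
--     n = len(subtoken_map)
--     idx = 0
--     while idx < n:
--         t = subtoken_map[idx]
--         j = idx + 1
--         while j < n and subtoken_map[j] == t:
--             j += 1
--         token_id2offset[t] = (idx, j - 1)
--         idx = j
--     return token_id2offset
-- ===== Notes on version B (the rewrite author's own statement) =====
-- stated objective: simpler
-- what changed: B splits the list into maximal runs of equal values (outer loop per run, inner scan for the run length) instead of A's element-wise fold carrying (start, end, prev) state plus a trailing conditional insert; empty input is excluded by Pre_ because A raises IndexError there, while B naturally returns {}.
import Mathlib
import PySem

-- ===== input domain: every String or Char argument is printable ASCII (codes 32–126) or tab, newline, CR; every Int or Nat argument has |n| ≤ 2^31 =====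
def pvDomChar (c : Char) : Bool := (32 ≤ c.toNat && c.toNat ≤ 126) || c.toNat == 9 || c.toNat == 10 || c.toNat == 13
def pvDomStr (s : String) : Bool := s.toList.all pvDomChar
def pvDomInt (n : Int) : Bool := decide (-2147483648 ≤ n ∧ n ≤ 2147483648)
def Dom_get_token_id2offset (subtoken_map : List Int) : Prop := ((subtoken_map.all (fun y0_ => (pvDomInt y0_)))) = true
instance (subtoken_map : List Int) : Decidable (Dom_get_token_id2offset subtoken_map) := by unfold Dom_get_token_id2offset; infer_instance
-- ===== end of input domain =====

-- B replaces A's element-wise fold (tracking start/end/prev state plus a trailing conditional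
-- insert) by a run-splitting loop: one dict insert per maximal run of equal values (objective: simpler).

-- ===== PORT A =====
-- loop body of A: updates (dict, s, e, prev) for one enumerate step (i, t)
def aStep (st : PySem.Dict Int (Int × Int) × Int × Int × Int) (p : Int × Int) :
    PySem.Dict Int (Int × Int) × Int × Int × Int :=
  let (d, s, e, prev) := st
  let (i, t) := p
  if t ≠ prev then (d.insert prev (s, e), i, i, t) else (d, s, i, t)

def get_token_id2offset (subtoken_map : List Int) : List (Int × Int × Int) :=
  match PySem.List.pyGet? subtoken_map 0 with
  | none => []   -- IndexError on the empty list: excluded by Pre_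
  | some p0 =>
    let st := (PySem.List.enumerate subtoken_map).foldl aStep (PySem.Dict.empty, 0, 0, p0)
    match PySem.List.pyGet? subtoken_map (-1) with
    | none => st.1.items
    | some lastv =>
      if lastv = st.2.2.2 then (st.1.insert st.2.2.2 (st.2.1, st.2.2.1)).items
      else st.1.items

-- ===== PORT B =====
-- inner while loop of B, counting how far the leading run of values equal to t extends into
-- the tail (B's counter m starts at 1 over rest = t :: tail, so this returns m - 1)
def altRun (t : Int) : List Int → Nat
  | [] => 0
  | x :: xs => if x = t then altRun t xs + 1 else 0

-- outer while loop of B over the remaining list, carrying idx and the dict; the Nat argument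
-- is fuel making the recursion structural — each pass consumes ≥ 1 element, so length suffices
def altGo (d : PySem.Dict Int (Int × Int)) (idx : Int) : Nat → List Int → PySem.Dict Int (Int × Int)
  | _, [] => d
  | 0, _ :: _ => d
  | fuel + 1, t :: rest =>
    let m := altRun t rest
    altGo (d.insert t (idx, idx + m)) (idx + m + 1) fuel (rest.drop m)

def get_token_id2offset_alt (subtoken_map : List Int) : List (Int × Int × Int) :=
  (altGo PySem.Dict.empty 0 subtoken_map.length subtoken_map).items

-- ===== PRECONDITION & SPEC =====
-- Pre_ excludes exactly the empty list, on which A raises IndexError (subtoken_map[0]).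
def Pre_get_token_id2offset (subtoken_map : List Int) : Prop := subtoken_map ≠ []
instance (subtoken_map : List Int) : Decidable (Pre_get_token_id2offset subtoken_map) := by
  unfold Pre_get_token_id2offset; infer_instance
def pvWitness_get_token_id2offset : List Int := [3, 3, 5, 3]

def Spec_get_token_id2offset (subtoken_map : List Int) (out : List (Int × Int × Int)) : Prop := out = get_token_id2offset_alt subtoken_map
instance (subtoken_map : List Int) (out : List (Int × Int × Int)) : Decidable (Spec_get_token_id2offset subtoken_map out) := by unfold Spec_get_token_id2offset; infer_instance

-- ===== CLAIM (what is proved, stated in full; the proofs are below) =====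
def Claim_equal_get_token_id2offset : Prop := ∀ (subtoken_map : List Int), Dom_get_token_id2offset subtoken_map → Pre_get_token_id2offset subtoken_map → Spec_get_token_id2offset subtoken_map (get_token_id2offset subtoken_map)

-- ===== LEMMAS AND PROOFS =====

-- A's trailing insert, as a function of the fold's final state
def aFinish (st : PySem.Dict Int (Int × Int) × Int × Int × Int) : PySem.Dict Int (Int × Int) :=
  st.1.insert st.2.2.2 (st.2.1, st.2.2.1)

lemma aStep_prev (st : PySem.Dict Int (Int × Int) × Int × Int × Int) (p : Int × Int) :
    (aStep st p).2.2.2 = p.2 := by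
  obtain ⟨d, s, e, prev⟩ := st; obtain ⟨i, t⟩ := p
  simp only [aStep]; split_ifs <;> rfl

-- the prev component of A's fold is the last element of the enumerated list
lemma aStep_prev_last (xs : List Int) : ∀ (i : Int) (st : PySem.Dict Int (Int × Int) × Int × Int × Int),
    ((PySem.List.enumerate xs i).foldl aStep st).2.2.2 = xs.getLastD st.2.2.2 := by
  induction xs with
  | nil => intro i st; simp [PySem.List.enumerate_nil]
  | cons x xs ih =>
    intro i st
    rw [PySem.List.enumerate_cons, List.foldl_cons, ih, aStep_prev]
    cases xs <;> simp [List.getLastD]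

lemma pyGet_zero_cons (x : Int) (xs : List Int) :
    PySem.List.pyGet? (x :: xs) 0 = some x := by
  simp [PySem.List.pyGet?, PySem.List.pyIdx?]

lemma pyGet_neg_one_cons (x : Int) (xs : List Int) :
    PySem.List.pyGet? (x :: xs) (-1) = some ((x :: xs).getLastD 0) := by
  simp only [PySem.List.pyGet?, PySem.List.pyIdx?]
  norm_num
  rw [List.getLast?_eq_getElem?]
  simp

-- main invariant: finishing A's fold from any mid-run state equals B's run loop on the rest
lemma main_inv (xs : List Int) : ∀ (fuel : Nat), xs.length ≤ fuel → ∀ (i : Int) (d : PySem.Dict Int (Int × Int)) (s e prev : Int),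
    aFinish ((PySem.List.enumerate xs i).foldl aStep (d, s, e, prev))
    = altGo (d.insert prev (s, if altRun prev xs = 0 then e else i + altRun prev xs - 1))
        (i + altRun prev xs) fuel (xs.drop (altRun prev xs)) := by
  induction xs with
  | nil =>
    intro fuel _ i d s e prev
    simp [PySem.List.enumerate_nil, altRun, aFinish]
    cases fuel <;> simp [altGo]
  | cons x xs ih =>
    intro fuel hf i d s e prev
    rw [PySem.List.enumerate_cons, List.foldl_cons]
    by_cases hx : x = prev
    · subst hx
      have hstep : aStep (d, s, e, x) (i, x) = (d, s, i, x) := by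
        simp [aStep]
      rw [hstep, ih fuel (by simpa using Nat.le_of_succ_le hf) (i+1) d s i x]
      have hm : altRun x (x :: xs) = altRun x xs + 1 := by simp [altRun]
      rw [hm]
      simp only [List.drop_succ_cons]
      by_cases h0 : altRun x xs = 0
      · simp [h0]
      · have h1 : (if altRun x xs = 0 then (i:Int) else i + 1 + ↑(altRun x xs) - 1)
            = i + ↑(altRun x xs + 1) - 1 := by
          rw [if_neg h0]; push_cast; ring
        have h2 : (i:Int) + 1 + ↑(altRun x xs) = i + ↑(altRun x xs + 1) := by push_cast; ring
        rw [h1, h2, if_neg (by omega)]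
    · have hstep : aStep (d, s, e, prev) (i, x) = (d.insert prev (s, e), i, i, x) := by
        simp [aStep, hx]
      rw [hstep]
      have hm : altRun prev (x :: xs) = 0 := by simp [altRun, hx]
      rw [hm]
      simp only [Nat.cast_zero, add_zero, List.drop_zero, if_true]
      obtain ⟨f, rfl⟩ : ∃ f, fuel = f + 1 := by
        cases fuel with
        | zero => simp at hf
        | succ f => exact ⟨f, rfl⟩
      rw [show altGo (d.insert prev (s, e)) i (f+1) (x :: xs)
          = altGo ((d.insert prev (s, e)).insert x (i, i + altRun x xs)) (i + altRun x xs + 1) f (xs.drop (altRun x xs)) from rfl]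
      rw [ih f (by simpa using Nat.lt_succ_iff.mp hf) (i+1) (d.insert prev (s,e)) i i x]
      by_cases h0 : altRun x xs = 0
      · simp [h0]
      · rw [if_neg h0]
        have h1 : (i:Int) + 1 + ↑(altRun x xs) - 1 = i + ↑(altRun x xs) := by ring
        have h2 : (i:Int) + 1 + ↑(altRun x xs) = i + ↑(altRun x xs) + 1 := by ring
        rw [h1, h2]

-- ===== VERDICT (by name: the statement is the Claim_ definition above) =====
theorem get_token_id2offset_spec : Claim_equal_get_token_id2offset := by
  intro xs _ hpre
  unfold Spec_get_token_id2offset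
  obtain ⟨x, rest, rfl⟩ : ∃ y ys, xs = y :: ys := by
    cases xs with
    | nil => exact absurd rfl hpre
    | cons y ys => exact ⟨y, ys, rfl⟩
  simp only [get_token_id2offset, get_token_id2offset_alt, pyGet_zero_cons, pyGet_neg_one_cons]
  rw [PySem.List.enumerate_cons, List.foldl_cons]
  have hstep : aStep (PySem.Dict.empty, 0, 0, x) ((0:Int), x) = (PySem.Dict.empty, 0, 0, x) := by
    simp [aStep]
  rw [hstep]
  rw [if_pos (show (x :: rest).getLastD 0
      = ((PySem.List.enumerate rest (0+1)).foldl aStep ((PySem.Dict.empty : PySem.Dict Int (Int × Int)), 0, 0, x)).2.2.2 by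
    rw [aStep_prev_last]; cases rest <;> simp [List.getLastD])]
  show (aFinish ((PySem.List.enumerate rest (0+1)).foldl aStep (PySem.Dict.empty, 0, 0, x))).items = _
  rw [main_inv rest rest.length le_rfl (0+1) PySem.Dict.empty 0 0 x]
  rw [show altGo PySem.Dict.empty 0 (x :: rest).length (x :: rest)
      = altGo (PySem.Dict.empty.insert x (0, 0 + (altRun x rest : Int))) (0 + altRun x rest + 1)
          rest.length (rest.drop (altRun x rest)) from rfl]
  by_cases h0 : altRun x rest = 0
  · simp [h0]
  · rw [if_neg h0]
    norm_num
    rw [add_comm (1 : Int) (altRun x rest : Int)]
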